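-- pv_equiv track=rewrite | github.com/mkdirswk/algorithm | programmers/Python/Level2/tower.py | solution
-- ===== SOURCE A (Python) =====
-- def solution(heights):
--
--     heights.reverse()
--     receive_tower = []
--
--     for i in range(len(heights)):
--         receive_tower.append(0)
--
--     for m in range(len(heights)):
--         for n in range(m, len(heights)):
--             if heights[n] > heights[m]:
--                 receive_tower[n] = len(heights) - n
--                 continue
--
--
--     return receive_tower
-- ===== SOURCE B (Python) =====
-- def solution(heights):
--     n = len(heights)
--     res = []
--     mn = None
--     for i, h in enumerate(reversed(heights)):
--         res.append(n - i if mn is not None and h > mn else 0)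
--         if mn is None or h < mn:
--             mn = h
--     return res
-- ===== Notes on version B (the rewrite author's own statement) =====
-- stated objective: faster
-- what changed: Replaced A's quadratic double scan over the reversed list (re-writing slot n whenever any earlier tower is smaller) by a single pass that tracks the running minimum and marks a tower iff it exceeds the minimum seen so far.
import Mathlib
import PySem

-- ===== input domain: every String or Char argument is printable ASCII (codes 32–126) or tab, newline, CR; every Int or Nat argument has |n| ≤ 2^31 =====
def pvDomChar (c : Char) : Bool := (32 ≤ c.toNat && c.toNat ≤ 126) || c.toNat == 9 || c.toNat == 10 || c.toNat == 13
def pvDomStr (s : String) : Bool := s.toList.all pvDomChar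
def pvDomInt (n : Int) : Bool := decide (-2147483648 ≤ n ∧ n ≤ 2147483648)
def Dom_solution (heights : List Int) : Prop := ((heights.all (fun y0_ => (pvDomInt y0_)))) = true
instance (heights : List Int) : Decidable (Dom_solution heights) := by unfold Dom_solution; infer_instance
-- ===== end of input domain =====

-- B replaces A's quadratic double scan by one pass over the reversed list tracking the running
-- minimum (objective: faster, asymptotic). Note: Python A reverses `heights` IN PLACE; B does not
-- mutate its argument — the equivalence proved here is about the RETURN value only.

-- ===== PORT A =====
def solution (heights : List Int) : List Int :=
  let hs := heights.reverse
  let receive_tower :=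
    (PySem.List.pyRange 0 (hs.length : Int) 1).foldl (fun acc _ => acc ++ [(0 : Int)]) []
  (PySem.List.pyRange 0 (hs.length : Int) 1).foldl (fun rt m =>
    (PySem.List.pyRange m (hs.length : Int) 1).foldl (fun rt n =>
      if PySem.List.pyGetD hs n 0 > PySem.List.pyGetD hs m 0 then
        PySem.List.pySetD rt n ((hs.length : Int) - n)
      else rt) rt) receive_tower

-- ===== PORT B =====
def solution_alt (heights : List Int) : List Int :=
  let n : Int := heights.length
  ((PySem.List.enumerate heights.reverse 0).foldl
    (fun (st : List Int × Option Int) p =>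
      (st.1 ++ [match st.2 with
                | some mn => if p.2 > mn then n - p.1 else 0
                | none => 0],
       match st.2 with
       | none => some p.2
       | some mn => if p.2 < mn then some p.2 else some mn))
    ([], none)).1

-- ===== PRECONDITION & SPEC =====
def Spec_solution (heights : List Int) (out : List Int) : Prop := out = solution_alt heights
instance (heights : List Int) (out : List Int) : Decidable (Spec_solution heights out) := by unfold Spec_solution; infer_instance

-- ===== CLAIM (what is proved, stated in full; the proofs are below) =====
def Claim_equal_solution : Prop := ∀ (heights : List Int), Dom_solution heights → Spec_solution heights (solution heights)

-- ===== LEMMAS AND PROOFS =====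

/-- value of position `k` in the answer: nonzero iff some earlier (in the reversed list) tower is
strictly smaller. -/
def markAt (hs : List Int) (k : Nat) : Int :=
  if (hs.take k).any (fun x => decide (x < hs.getD k 0)) then (hs.length : Int) - k else 0

def marks (hs : List Int) : List Int := (List.range hs.length).map (markAt hs)

/-- running minimum of a prefix, as B's loop maintains it (`None` on the empty prefix). -/
def minO : List Int → Option Int
  | [] => none
  | x :: t => some (t.foldl min x)

/-- B's loop body, named for the proofs. -/
def bstep (n : Int) (st : List Int × Option Int) (p : Int × Int) : List Int × Option Int :=
  (st.1 ++ [match st.2 with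
            | some mn => if p.2 > mn then n - p.1 else 0
            | none => 0],
   match st.2 with
   | none => some p.2
   | some mn => if p.2 < mn then some p.2 else some mn)

lemma minO_append_singleton (l : List Int) (h : Int) :
    minO (l ++ [h]) = some (match minO l with
      | none => h
      | some m => if h < m then h else m) := by
  cases l with
  | nil => simp [minO]
  | cons x t =>
    simp only [minO, List.cons_append, List.foldl_append, List.foldl_cons, List.foldl_nil,
      Option.some.injEq]
    rcases le_or_gt (t.foldl min x) h with h1 | h1
    · simp [min_eq_left h1, if_neg (not_lt.mpr h1)]
    · simp [min_eq_right (le_of_lt h1), if_pos h1]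

lemma minO_lt_iff (l : List Int) (h : Int) :
    (match minO l with | none => False | some m => m < h) ↔ ∃ x ∈ l, x < h := by
  cases l with
  | nil => simp [minO]
  | cons x t =>
    simp only [minO]
    constructor
    · intro hlt
      rcases PySem.List.foldl_min_mem t x with hm | hm
      · exact ⟨x, by simp, by rwa [hm] at hlt⟩
      · exact ⟨t.foldl min x, by simp [hm], hlt⟩
    · rintro ⟨y, hy, hlt⟩
      rcases List.mem_cons.mp hy with rfl | hy
      · exact lt_of_le_of_lt (PySem.List.foldl_min_le t y).1 hlt
      · exact lt_of_le_of_lt ((PySem.List.foldl_min_le t x).2 y hy) hlt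

lemma markAt_at_split (pre : List Int) (h : Int) (rest : List Int) :
    markAt (pre ++ h :: rest) pre.length =
      if ∃ x ∈ pre, x < h then ((pre ++ h :: rest).length : Int) - pre.length else 0 := by
  have h1 : (pre ++ h :: rest).take pre.length = pre := by
    simp
  have h2 : (pre ++ h :: rest).getD pre.length 0 = h := by
    rw [List.getD_eq_getElem _ _ (by simp), List.getElem_append_right (le_refl _)]
    simp
  simp only [markAt, h1, h2]
  congr 1
  simp

lemma B_inv (full : List Int) :
    ∀ (rest pre res : List Int), pre ++ rest = full →
    ((PySem.List.enumerate rest (pre.length : Int)).foldl (bstep (full.length : Int))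
        (res, minO pre)).1
      = res ++ (List.range rest.length).map (fun j => markAt full (pre.length + j)) := by
  intro rest
  induction rest with
  | nil => intro pre res _; simp [PySem.List.enumerate_nil]
  | cons h rest' ih =>
    intro pre res hsplit
    rw [PySem.List.enumerate_cons, List.foldl_cons]
    have hstep : bstep (full.length : Int) (res, minO pre) ((pre.length : Int), h)
        = (res ++ [markAt full pre.length], minO (pre ++ [h])) := by
      unfold bstep
      refine Prod.ext ?_ ?_
      · simp only
        congr 1
        have := markAt_at_split pre h rest'
        rw [hsplit] at this
        rw [this]
        rcases hm : minO pre with _ | m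
        · have : pre = [] := by cases pre <;> simp_all [minO]
          simp [this]
        · have hiff := minO_lt_iff pre h
          rw [hm] at hiff
          simp only at hiff
          by_cases hlt : m < h
          · simp [hlt, hiff.mp hlt]
          · have hne : ¬ ∃ x ∈ pre, x < h := fun hx => hlt (hiff.mpr hx)
            simp [hlt, hne]
      · simp only
        rw [minO_append_singleton]
        rcases minO pre with _ | m
        · rfl
        · rw [apply_ite some]
    rw [hstep]
    have hlen : ((pre.length : Int) + 1) = (((pre ++ [h]).length : Nat) : Int) := by
      simp
    rw [hlen, ih (pre ++ [h]) (res ++ [markAt full pre.length]) (by simpa using hsplit)]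
    rw [List.append_assoc]
    congr 1
    have : (List.range (rest'.length + 1)) = 0 :: (List.range rest'.length).map Nat.succ :=
      List.range_succ_eq_map
    simp only [List.length_cons, this, List.map_cons, List.map_map]
    simp only [List.singleton_append, Nat.add_zero]
    congr 1
    apply List.map_congr_left
    intro j _
    simp only [Function.comp, List.length_append, List.length_cons, List.length_nil]
    congr 1
    omega

lemma foldl_set_len {α : Type} (N0 : Nat) (g : List Int → α → List Int) (L : List α)
    (hlen : ∀ rt a, rt.length = N0 → (g rt a).length = N0) :
    ∀ rt, rt.length = N0 → (L.foldl g rt).length = N0 := by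
  induction L with
  | nil => intro rt h; simpa using h
  | cons a t ih => intro rt h; exact ih _ (hlen rt a h)

lemma foldl_set_pointwise {α : Type} (N0 : Nat) (f : Nat → Int) (C : α → Nat → Bool)
    (g : List Int → α → List Int) :
    ∀ L : List α,
    (∀ rt a, rt.length = N0 → a ∈ L → (g rt a).length = N0) →
    (∀ rt a, rt.length = N0 → a ∈ L →
      ∀ k, (g rt a).getD k 0 = if C a k then f k else rt.getD k 0) →
    ∀ rt, rt.length = N0 → ∀ k,
      (L.foldl g rt).getD k 0 = if L.any (fun a => C a k) then f k else rt.getD k 0 := by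
  intro L
  induction L with
  | nil => intro _ _ rt h k; simp
  | cons a t ih =>
    intro hlen hget rt h k
    simp only [List.foldl_cons, List.any_cons]
    rw [ih (fun rt b hb hm => hlen rt b hb (by simp [hm]))
        (fun rt b hb hm => hget rt b hb (by simp [hm])) _ (hlen rt a h (by simp)) k,
      hget rt a h (by simp)]
    by_cases h1 : C a k <;> by_cases h2 : t.any (fun b => C b k) <;> simp [h1, h2]

-- inner loop: getD characterisation
lemma inner_getD (hs : List Int) (m : Int) (hm : 0 ≤ m) :
    ∀ rt, rt.length = hs.length → ∀ k,
      ((PySem.List.pyRange m (hs.length : Int) 1).foldl (fun rt n =>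
        if PySem.List.pyGetD hs n 0 > PySem.List.pyGetD hs m 0 then
          PySem.List.pySetD rt n ((hs.length : Int) - n)
        else rt) rt).getD k 0
      = if (decide (m ≤ (k : Int)) && decide ((k : Int) < (hs.length : Int)) &&
            decide (PySem.List.pyGetD hs m 0 < PySem.List.pyGetD hs (k : Int) 0))
        then (hs.length : Int) - k else rt.getD k 0 := by
  intro rt hrt k
  rw [foldl_set_pointwise hs.length (fun k => (hs.length : Int) - k)
    (fun n k => (n == (k : Int)) && decide (PySem.List.pyGetD hs m 0 < PySem.List.pyGetD hs n 0))
    _ (PySem.List.pyRange m (hs.length : Int) 1)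
    ?_ ?_ rt hrt k]
  · congr 1
    apply propext
    simp only [List.any_eq_true, PySem.List.mem_pyRange_one, Bool.and_eq_true, beq_iff_eq,
      decide_eq_true_eq]
    constructor
    · rintro ⟨n, ⟨h1, h2⟩, rfl, h3⟩
      exact ⟨⟨h1, h2⟩, h3⟩
    · rintro ⟨⟨h1, h2⟩, h3⟩
      exact ⟨(k : Int), ⟨h1, h2⟩, rfl, h3⟩
  · intro rt a hl _
    split
    · rw [PySem.List.length_pySetD, hl]
    · exact hl
  · intro rt n hl hmem j
    have hn : 0 ≤ n ∧ n < (hs.length : Int) := by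
      rw [PySem.List.mem_pyRange_one] at hmem; exact ⟨le_trans hm hmem.1, hmem.2⟩
    by_cases hP : PySem.List.pyGetD hs m 0 < PySem.List.pyGetD hs n 0
    · rw [if_pos (by exact hP), PySem.List.pySetD_of_nonneg _ _ hn.1]
      by_cases hk : n = (j : Int)
      · have hjn : n.toNat = j := by omega
        have hjlen : j < rt.length := by omega
        rw [if_pos (by subst hk; simp at hP; simp [hP])]
        rw [List.getD_eq_getElem _ _ (by simpa [hjn] using hjlen), List.getElem_set]
        simp [hk]
      · have hjn : n.toNat ≠ j := by omega
        rw [if_neg (by simp [hk])]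
        rcases lt_or_ge j rt.length with hj | hj
        · rw [List.getD_eq_getElem _ _ (by simpa using hj),
            List.getD_eq_getElem _ _ hj, List.getElem_set]
          simp [hjn]
        · rw [List.getD_eq_default _ _ (by simpa using hj), List.getD_eq_default _ _ hj]
    · rw [if_neg (by exact hP), if_neg (by simp [hP])]


lemma Aany_eq (hs : List Int) (k : Nat) (hk : k < hs.length) :
    ((PySem.List.pyRange 0 (hs.length : Int) 1).any (fun m =>
        decide (m ≤ (k : Int)) && decide ((k : Int) < (hs.length : Int)) &&
        decide (PySem.List.pyGetD hs m 0 < PySem.List.pyGetD hs (k : Int) 0)))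
      = (hs.take k).any (fun x => decide (x < hs.getD k 0)) := by
  rw [Bool.eq_iff_iff]
  simp only [List.any_eq_true, PySem.List.mem_pyRange_one, Bool.and_eq_true, decide_eq_true_eq,
    PySem.List.pyGetD_natCast, List.mem_take_iff_getElem]
  constructor
  · rintro ⟨m, ⟨hm0, hmN⟩, ⟨hmk, _⟩, hlt⟩
    rw [PySem.List.pyGetD_eq_getElem _ _ hm0 hmN] at hlt
    by_cases hcase : m.toNat = k
    · exfalso
      have hm' : m = (k : Int) := by omega
      subst hm'
      rw [List.getD_eq_getElem _ _ hk] at hlt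
      simp at hlt
    · exact ⟨hs[m.toNat]'(by omega), ⟨m.toNat, by omega, rfl⟩, hlt⟩
  · rintro ⟨x, ⟨j, hj, hjx⟩, hlt⟩
    refine ⟨(j : Nat), ⟨by omega, by omega⟩, ⟨by omega, by omega⟩, ?_⟩
    rw [PySem.List.pyGetD_natCast]
    rw [List.getD_eq_getElem _ _ (by omega), hjx]
    exact hlt

lemma solution_getD (heights : List Int) (k : Nat) :
    (solution heights).getD k 0 =
      if h : k < heights.length then markAt heights.reverse k else 0 := by
  unfold solution
  simp only []
  set hs := heights.reverse with hhs
  have hNlen : ∀ rt : List Int, rt.length = hs.length →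
      ∀ m : Int, ((PySem.List.pyRange m (hs.length : Int) 1).foldl (fun rt n =>
        if PySem.List.pyGetD hs n 0 > PySem.List.pyGetD hs m 0 then
          PySem.List.pySetD rt n ((hs.length : Int) - n)
        else rt) rt).length = hs.length := by
    intro rt hrt m
    refine foldl_set_len hs.length _ _ ?_ rt hrt
    intro rt a h
    split
    · rw [PySem.List.length_pySetD, h]
    · exact h
  have hrt0 : ((PySem.List.pyRange 0 (hs.length : Int) 1).foldl
      (fun acc _ => acc ++ [(0 : Int)]) ([] : List Int)) = List.replicate hs.length 0 := by
    rw [show (fun (acc : List Int) (_ : Int) => acc ++ [(0 : Int)]) =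
        (fun (acc : List Int) (x : Int) => acc ++ [(fun _ => (0:Int)) x]) from rfl,
      PySem.List.foldl_append_singleton_eq_map]
    rw [List.eq_replicate_iff]
    constructor
    · simp [PySem.List.length_pyRange_one]
    · intro b hb
      simp only [List.nil_append, List.mem_map] at hb
      obtain ⟨_, _, rfl⟩ := hb
      rfl
  rw [hrt0]
  rw [foldl_set_pointwise hs.length (fun k => (hs.length : Int) - k)
    (fun m k => decide (m ≤ (k : Int)) && decide ((k : Int) < (hs.length : Int)) &&
        decide (PySem.List.pyGetD hs m 0 < PySem.List.pyGetD hs (k : Int) 0))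
    _ (PySem.List.pyRange 0 (hs.length : Int) 1)
    (fun rt a h _ => hNlen rt h a)
    ?_ _ (by simp) k]
  · by_cases hk : k < heights.length
    · rw [dif_pos hk]
      have hk' : k < hs.length := by simpa [hhs] using hk
      rw [Aany_eq hs k hk']
      unfold markAt
      split
      · rfl
      · exact List.getD_replicate _ hk'
    · rw [dif_neg hk]
      have hk' : ¬ k < hs.length := by simpa [hhs] using hk
      have : ((PySem.List.pyRange 0 (hs.length : Int) 1).any (fun m =>
          decide (m ≤ (k : Int)) && decide ((k : Int) < (hs.length : Int)) &&
          decide (PySem.List.pyGetD hs m 0 < PySem.List.pyGetD hs (k : Int) 0))) = false := by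
        simp only [List.any_eq_false, Bool.and_eq_true, decide_eq_true_eq, not_and]
        intro m _ hpair
        exact fun _ => hk' (by exact_mod_cast hpair.2)
      rw [this]
      simp only [Bool.false_eq_true, if_false]
      rw [List.getD_eq_default]
      simpa using hk'
  · intro rt m h hmem j
    have hm0 : 0 ≤ m := by
      rw [PySem.List.mem_pyRange_one] at hmem; exact hmem.1
    exact inner_getD hs m hm0 rt h j

lemma A_eq (heights : List Int) : solution heights = marks heights.reverse := by
  have hlenA : (solution heights).length = heights.length := by
    unfold solution
    simp only []
    set hs := heights.reverse with hhs
    have h1 : ((PySem.List.pyRange 0 (hs.length : Int) 1).foldl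
        (fun acc _ => acc ++ [(0 : Int)]) ([] : List Int)).length = hs.length := by
      rw [show (fun (acc : List Int) (_ : Int) => acc ++ [(0 : Int)]) =
          (fun (acc : List Int) (x : Int) => acc ++ [(fun _ => (0:Int)) x]) from rfl,
        PySem.List.foldl_append_singleton_eq_map]
      simp [PySem.List.length_pyRange_one]
    have h2 := foldl_set_len hs.length (fun rt m =>
      (PySem.List.pyRange m (hs.length : Int) 1).foldl (fun rt n =>
        if PySem.List.pyGetD hs n 0 > PySem.List.pyGetD hs m 0 then
          PySem.List.pySetD rt n ((hs.length : Int) - n)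
        else rt) rt) (PySem.List.pyRange 0 (hs.length : Int) 1) ?_ _ h1
    · rw [h2, hhs, List.length_reverse]
    · intro rt a h
      refine foldl_set_len hs.length _ _ ?_ rt h
      intro rt b hb
      split
      · rw [PySem.List.length_pySetD, hb]
      · exact hb
  apply List.ext_getElem
  · simp [hlenA, marks]
  · intro k h1 h2
    have hk : k < heights.length := by rwa [hlenA] at h1
    have := solution_getD heights k
    rw [dif_pos hk] at this
    rw [← List.getD_eq_getElem _ 0 h1, this]
    simp only [marks]
    rw [List.getElem_map, List.getElem_range]

lemma B_eq (heights : List Int) : solution_alt heights = marks heights.reverse := by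
  have h0 : solution_alt heights
      = ((PySem.List.enumerate heights.reverse ((([] : List Int).length : Nat) : Int)).foldl
          (bstep ((heights.reverse).length : Int)) ([], minO [])).1 := by
    simp only [List.length_nil, Nat.cast_zero, List.length_reverse]
    rfl
  rw [h0, B_inv heights.reverse heights.reverse [] [] (by simp)]
  simp [marks]

-- ===== VERDICT (by name: the statement is the Claim_ definition above) =====
theorem solution_spec : Claim_equal_solution := by
  intro heights _
  show _ = _
  rw [A_eq, B_eq]
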